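-- pv_equiv track=rewrite | github.com/sueszli/vector-database-benchmark | dataset/python-mutated/Nexus.py | _compact4nexus
-- ===== SOURCE A (Python) =====
-- def _compact4nexus(orig_list):
--     if False:
--         while True:
--             i = 10
--     "Compact lists for Nexus output (PRIVATE).\n\n    Example\n    -------\n    >>> _compact4nexus([1, 2, 3, 5, 6, 7, 8, 12, 15, 18, 20])\n    '2-4 6-9 13-19\\\\3 21'\n\n    Transform [1 2 3 5 6 7 8 12 15 18 20] (baseindex 0, used in the Nexus class)\n    into '2-4 6-9 13-19\\\\3 21' (baseindex 1, used in programs like Paup or MrBayes.).\n\n    "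
--     if not orig_list:
--         return ''
--     orig_list = sorted(set(orig_list))
--     shortlist = []
--     clist = orig_list[:]
--     clist.append(clist[-1] + 0.5)
--     while len(clist) > 1:
--         step = 1
--         for (i, x) in enumerate(clist):
--             if x == clist[0] + i * step:
--                 continue
--             elif i == 1 and len(clist) > 3 and (clist[i + 1] - x == x - clist[0]):
--                 step = x - clist[0]
--             else:
--                 sub = clist[:i]
--                 if len(sub) == 1:
--                     shortlist.append(str(sub[0] + 1))
--                 elif step == 1:
--                     shortlist.append('%d-%d' % (sub[0] + 1, sub[-1] + 1))
--                 else: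
--                     shortlist.append('%d-%d\\%d' % (sub[0] + 1, sub[-1] + 1, step))
--                 clist = clist[i:]
--                 break
--     return ' '.join(shortlist)
-- ===== SOURCE B (Python) =====
-- def _rle(ds):
--     # run-length encode a list: one pass, extending the last run or opening a new one
--     runs = []
--     for g in ds:
--         if runs and runs[-1][0] == g:
--             runs[-1] = (g, runs[-1][1] + 1)
--         else:
--             runs.append((g, 1))
--     return runs
--
--
-- def _compact4nexus(orig_list):
--     if not orig_list:
--         return ''
--     xs = sorted(set(orig_list))
--     # stage 1: gap sequence, run-length encoded
--     runs = _rle([b - a for a, b in zip(xs, xs[1:])])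
--     # stage 2: one output group per gap-run, with a one-diff carry across groups
--     parts = []
--     pos = 0  # index of the current group's first element
--     j = 0    # diff index where the current run starts
--     for g, cnt in runs:
--         r = cnt - (pos - j)  # diffs of this run still ahead of pos
--         if r >= 1 and g == 1:
--             parts.append('%d-%d' % (xs[pos] + 1, xs[pos + r] + 1))
--             pos += r + 1
--         elif r >= 2:
--             parts.append('%d-%d\\%d' % (xs[pos] + 1, xs[pos + r] + 1, g))
--             pos += r + 1
--         elif r == 1:
--             parts.append(str(xs[pos] + 1))
--             pos += 1
--         j += cnt
--     if pos == len(xs) - 1: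
--         parts.append(str(xs[pos] + 1))
--     return ' '.join(parts)
-- ===== Notes on version B (the rewrite author's own statement) =====
-- stated objective: alternative
-- what changed: Replaces A's greedy peel (float-sentinel, enumerate rescans of the remaining list with mid-loop step mutation and repeated slicing) by a staged pipeline: compute the gap sequence once, run-length encode it recursively, then emit exactly one group per gap-run in a single pass over the runs with a one-diff carry; no rescanning or re-slicing of the element list ever happens.
import Mathlib
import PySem

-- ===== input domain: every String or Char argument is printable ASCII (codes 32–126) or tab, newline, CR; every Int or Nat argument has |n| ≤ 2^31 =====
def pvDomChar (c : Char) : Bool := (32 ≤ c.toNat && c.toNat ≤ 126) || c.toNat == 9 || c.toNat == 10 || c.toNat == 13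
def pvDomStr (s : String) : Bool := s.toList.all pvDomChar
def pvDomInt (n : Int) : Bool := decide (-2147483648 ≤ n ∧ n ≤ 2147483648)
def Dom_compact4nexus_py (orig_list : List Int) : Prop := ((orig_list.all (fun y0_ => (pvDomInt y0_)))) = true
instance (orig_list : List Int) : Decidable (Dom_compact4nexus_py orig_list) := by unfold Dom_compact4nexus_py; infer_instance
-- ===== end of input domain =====

-- B replaces A's greedy peel (float sentinel, enumerate rescans, repeated slicing) by a
-- staged pipeline: gap sequence, recursive run-length encoding, one group per gap-run
-- (alternative decomposition; return value only).

-- ===== PORT A =====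
-- A appends the float sentinel clist[-1] + 0.5; every value in play is an integer or an
-- integer plus one half, so the float arithmetic is modelled EXACTLY by scaling all
-- values by 2: clist holds 2*v for real elements and 2*last+1 for the sentinel, step is
-- stored doubled (initial step 1 -> 2), and the '%d' outputs divide by 2 (always exact).

-- the inner 'for (i, x) in enumerate(clist)' up to its break; returns (i, step) at break
def pvA_scanF : Nat → List Int → Nat → Int → Nat × Int
  | 0, _, i, step => (i, step)
  | f + 1, clist, i, step =>
    if h : i < clist.length then
      if clist[i] = clist.getD 0 0 + (i : Int) * step then
        pvA_scanF f clist (i + 1) step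
      else if i = 1 ∧ clist.length > 3 ∧ clist.getD (i + 1) 0 - clist[i] = clist[i] - clist.getD 0 0 then
        pvA_scanF f clist (i + 1) (clist[i] - clist.getD 0 0)
      else (i, step)
    else (i, step)

def pvA_scan (clist : List Int) (i : Nat) (step : Int) : Nat × Int :=
  pvA_scanF (clist.length - i) clist i step

-- the 'while len(clist) > 1' loop (fuel = initial length; each pass drops i ≥ 1 elements)
def pvA_loop (fuel : Nat) (clist : List Int) (shortlist : List String) : List String :=
  match fuel with
  | 0 => shortlist
  | f + 1 =>
    if clist.length > 1 then
      let p := pvA_scan clist 0 2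
      let sub := clist.take p.1
      let entry :=
        if sub.length = 1 then PySem.Int.toStr (sub.getD 0 0 / 2 + 1)
        else if p.2 = 2 then
          PySem.Int.toStr (sub.getD 0 0 / 2 + 1) ++ "-" ++ PySem.Int.toStr (sub.getLastD 0 / 2 + 1)
        else
          PySem.Int.toStr (sub.getD 0 0 / 2 + 1) ++ "-" ++ PySem.Int.toStr (sub.getLastD 0 / 2 + 1)
            ++ "\\" ++ PySem.Int.toStr (p.2 / 2)
      pvA_loop f (clist.drop p.1) (shortlist ++ [entry])
    else shortlist

def compact4nexus_py (orig_list : List Int) : String :=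
  if orig_list = [] then "" else
    let s := PySem.List.sorted (PySem.Set.ofList orig_list) (fun x => x) false
    -- clist = doubled values, then the sentinel clist[-1] + 0.5 (list is nonempty here)
    let clist := s.map (fun v => 2 * v) ++ [2 * s.getLastD 0 + 1]
    PySem.Str.join " " (pvA_loop clist.length clist [])

-- ===== PORT B =====
-- _rle(ds): one pass over ds, extending the last run or opening a new one
def pvRleStep (runs : List (Int × Nat)) (g : Int) : List (Int × Nat) :=
  match runs.getLast? with
  | some (g', c) => if g' = g then runs.dropLast ++ [(g, c + 1)] else runs ++ [(g, 1)]
  | none => [(g, 1)]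

def pvRle (ds : List Int) : List (Int × Nat) := ds.foldl pvRleStep []

-- the 'for g, cnt in runs' loop: state (parts, pos, j)
def pvB_fold (xs : List Int) : List (Int × Nat) → List String × Nat × Nat → List String × Nat × Nat
  | [], st => st
  | (g, cnt) :: rest, (parts, pos, j) =>
    let r := cnt - (pos - j)
    let st' :=
      if 1 ≤ r ∧ g = 1 then
        (parts ++ [PySem.Int.toStr (xs.getD pos 0 + 1) ++ "-" ++ PySem.Int.toStr (xs.getD (pos + r) 0 + 1)],
         pos + r + 1, j + cnt)
      else if 2 ≤ r then
        (parts ++ [PySem.Int.toStr (xs.getD pos 0 + 1) ++ "-" ++ PySem.Int.toStr (xs.getD (pos + r) 0 + 1)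
           ++ "\\" ++ PySem.Int.toStr g],
         pos + r + 1, j + cnt)
      else if r = 1 then
        (parts ++ [PySem.Int.toStr (xs.getD pos 0 + 1)], pos + 1, j + cnt)
      else (parts, pos, j + cnt)
    pvB_fold xs rest st'

def compact4nexus_py_alt (orig_list : List Int) : String :=
  if orig_list = [] then "" else
    let xs := PySem.List.sorted (PySem.Set.ofList orig_list) (fun x => x) false
    let runs := pvRle ((xs.zip (xs.drop 1)).map (fun p => p.2 - p.1))
    let st := pvB_fold xs runs ([], 0, 0)
    let parts := if st.2.1 = xs.length - 1 then st.1 ++ [PySem.Int.toStr (xs.getD st.2.1 0 + 1)] else st.1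
    PySem.Str.join " " parts

-- ===== PRECONDITION & SPEC =====
def Spec_compact4nexus_py (orig_list : List Int) (out : String) : Prop := out = compact4nexus_py_alt orig_list
instance (orig_list : List Int) (out : String) : Decidable (Spec_compact4nexus_py orig_list out) := by unfold Spec_compact4nexus_py; infer_instance

-- ===== CLAIM (what is proved, stated in full; the proofs are below) =====
def Claim_equal_compact4nexus_py : Prop := ∀ (orig_list : List Int), Dom_compact4nexus_py orig_list → Spec_compact4nexus_py orig_list (compact4nexus_py orig_list)

-- ===== LEMMAS AND PROOFS =====

-- proof-only middleman: a greedy peel loop over the sorted unique list (no sentinel);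
-- pv_loop_eq shows A's loop equals it, pv_fold_eq shows B's run-fold equals it.
def pvB_runF : Nat → List Int → Int → Nat → Nat
  | 0, _, _, k => k
  | f + 1, xs, g, k =>
    if h : k < xs.length then
      if xs[k] = xs.getD (k - 1) 0 + g then pvB_runF f xs g (k + 1) else k
    else k

def pvB_run (xs : List Int) (g : Int) (k : Nat) : Nat :=
  pvB_runF (xs.length - k) xs g k

lemma pvB_run_unfold (xs : List Int) (g : Int) (k : Nat) :
    pvB_run xs g k = if h : k < xs.length then
      (if xs[k] = xs.getD (k - 1) 0 + g then pvB_run xs g (k + 1) else k)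
    else k := by
  unfold pvB_run
  by_cases h : k < xs.length
  · rw [show xs.length - k = (xs.length - (k + 1)) + 1 from by omega]
    simp only [pvB_runF]
  · rw [show xs.length - k = 0 from by omega]
    simp only [pvB_runF]
    rw [dif_neg h]

def pvB_loop (fuel : Nat) (xs : List Int) (parts : List String) : List String :=
  match fuel with
  | 0 => parts
  | f + 1 =>
    if xs = [] then parts
    else
      if 2 ≤ xs.length ∧ xs.getD 1 0 = xs.getD 0 0 + 1 then
        pvB_loop f (xs.drop (pvB_run xs 1 1))
          (parts ++ [PySem.Int.toStr (xs.getD 0 0 + 1) ++ "-" ++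
            PySem.Int.toStr (xs.getD (pvB_run xs 1 1 - 1) 0 + 1)])
      else if 3 ≤ xs.length ∧ xs.getD 2 0 - xs.getD 1 0 = xs.getD 1 0 - xs.getD 0 0 then
        pvB_loop f (xs.drop (pvB_run xs (xs.getD 1 0 - xs.getD 0 0) 1))
          (parts ++ [PySem.Int.toStr (xs.getD 0 0 + 1) ++ "-" ++
            PySem.Int.toStr (xs.getD (pvB_run xs (xs.getD 1 0 - xs.getD 0 0) 1 - 1) 0 + 1)
            ++ "\\" ++ PySem.Int.toStr (xs.getD 1 0 - xs.getD 0 0)])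
      else
        pvB_loop f (xs.drop 1) (parts ++ [PySem.Int.toStr (xs.getD 0 0 + 1)])

lemma pvA_scan_unfold (clist : List Int) (i : Nat) (step : Int) :
    pvA_scan clist i step = if h : i < clist.length then
      (if clist[i] = clist.getD 0 0 + (i : Int) * step then
        pvA_scan clist (i + 1) step
      else if i = 1 ∧ clist.length > 3 ∧ clist.getD (i + 1) 0 - clist[i] = clist[i] - clist.getD 0 0 then
        pvA_scan clist (i + 1) (clist[i] - clist.getD 0 0)
      else (i, step))
    else (i, step) := by
  unfold pvA_scan
  by_cases h : i < clist.length
  · rw [show clist.length - i = (clist.length - (i + 1)) + 1 from by omega]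
    simp only [pvA_scanF]
  · rw [show clist.length - i = 0 from by omega]
    simp only [pvA_scanF]
    rw [dif_neg h]

-- indexing into the doubled list with sentinel
lemma pv_clist_getD_lt (ys : List Int) (w : Int) (j : Nat) (h : j < ys.length) :
    (ys.map (fun v => 2 * v) ++ [w]).getD j 0 = 2 * ys.getD j 0 := by
  rw [List.getD_eq_getElem?_getD, List.getElem?_append_left (by simpa using h),
    List.getElem?_map, List.getElem?_eq_getElem h]
  simp [List.getD_eq_getElem?_getD, List.getElem?_eq_getElem h]

lemma pv_clist_get_lt (ys : List Int) (w : Int) (j : Nat) (h : j < ys.length) :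
    (ys.map (fun v => 2 * v) ++ [w])[j]'(by simp; omega) = 2 * ys.getD j 0 := by
  have h2 := pv_clist_getD_lt ys w j h
  rw [List.getD_eq_getElem (ys.map (fun v => 2 * v) ++ [w]) 0 (by simp; omega)] at h2
  exact h2

lemma pv_clist_get_last (ys : List Int) (w : Int) :
    (ys.map (fun v => 2 * v) ++ [w])[ys.length]'(by simp) = w := by
  rw [List.getElem_append_right (by simp)]
  simp

lemma pv_getD_eq (ys : List Int) (j : Nat) (h : j < ys.length) : ys.getD j 0 = ys[j] :=
  List.getD_eq_getElem ys 0 h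

lemma pv_getD_take (l : List Int) (k : Nat) (hk : 0 < k) : (l.take k).getD 0 0 = l.getD 0 0 := by
  cases l with
  | nil => simp
  | cons a t =>
    obtain ⟨k', rfl⟩ : ∃ k', k = k' + 1 := ⟨k - 1, by omega⟩
    simp [List.take_succ_cons]

lemma pv_getLastD_take (l : List Int) (k : Nat) (h1 : 0 < k) (h2 : k ≤ l.length) :
    (l.take k).getLastD 0 = l.getD (k - 1) 0 := by
  rw [List.getLastD_eq_getLast?, List.getLast?_eq_getElem?, List.getD_eq_getElem?_getD]
  have hlen : (l.take k).length = k := by simp; omega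
  rw [hlen, List.getElem?_take_of_lt (by omega)]

lemma pv_drop_clist (ys : List Int) (w : Int) (k : Nat) (hk : k ≤ ys.length) :
    (ys.map (fun v => 2 * v) ++ [w]).drop k = (ys.drop k).map (fun v => 2 * v) ++ [w] := by
  rw [List.drop_append_of_le_length (by simpa using hk), List.map_drop]

lemma pv_two_mul_div (v : Int) : 2 * v / 2 = v := by omega

-- bounds for the run helper
lemma pv_run_bounds (m : Nat) : ∀ (xs : List Int) (g : Int) (i : Nat),
    xs.length - i ≤ m → i ≤ pvB_run xs g i ∧ pvB_run xs g i ≤ i + (xs.length - i) := by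
  induction m with
  | zero =>
    intro xs g i hm
    rw [pvB_run_unfold, dif_neg (by omega)]
    omega
  | succ m ih =>
    intro xs g i hm
    rw [pvB_run_unfold]
    split
    · split
      · have := ih xs g (i + 1) (by omega)
        omega
      · omega
    · omega

-- A's scan at the sentinel position: it always breaks there
lemma pv_scan_term (ys : List Int) (w g : Int) (hw : w % 2 = 1) (h2 : 2 ≤ ys.length) :
    pvA_scan (ys.map (fun v => 2 * v) ++ [w]) ys.length (2 * g) = (ys.length, 2 * g) := by
  rw [pvA_scan_unfold, dif_pos (by simp)]
  split
  · rename_i hc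
    exfalso
    rw [pv_clist_get_last, pv_clist_getD_lt ys w 0 (by omega)] at hc
    have h2dvd : (2 : Int) ∣ w := ⟨ys.getD 0 0 + (ys.length : Int) * g, by rw [hc]; ring⟩
    omega
  · split
    · rename_i hc
      exact absurd hc.1 (by omega)
    · rfl

-- A's generic scan phase (i ≥ 2, step already fixed at 2*g) agrees with the run helper
lemma pv_scan_run (m : Nat) : ∀ (i : Nat) (ys : List Int) (w g : Int),
    ys.length - i ≤ m → w % 2 = 1 → 2 ≤ i → i ≤ ys.length →
    (∀ j, j < ys.length → j < i → ys.getD j 0 = ys.getD 0 0 + (j : Int) * g) →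
    pvA_scan (ys.map (fun v => 2 * v) ++ [w]) i (2 * g) = (pvB_run ys g i, 2 * g) := by
  induction m with
  | zero =>
    intro i ys w g hm hw hi2 hile hinv
    have hie : i = ys.length := by omega
    subst hie
    rw [pv_scan_term ys w g hw (by omega), pvB_run_unfold, dif_neg (by omega)]
  | succ m ih =>
    intro i ys w g hm hw hi2 hile hinv
    rcases Nat.eq_or_lt_of_le hile with hie | hilt
    · subst hie
      rw [pv_scan_term ys w g hw (by omega), pvB_run_unfold, dif_neg (by omega)]
    · have hprev : ys.getD (i - 1) 0 = ys.getD 0 0 + ((i : Int) - 1) * g := by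
        have := hinv (i - 1) (by omega) (by omega)
        rw [this]
        have hc : ((i - 1 : Nat) : Int) = (i : Int) - 1 := by omega
        rw [hc]
      have hlt' : i < (ys.map (fun v => 2 * v) ++ [w]).length := by simp; omega
      rw [pvA_scan_unfold, dif_pos hlt']
      split
      · rename_i hc
        rw [pv_clist_get_lt ys w i hilt, pv_clist_getD_lt ys w 0 (by omega)] at hc
        have hcase : ys[i]'hilt = ys.getD (i - 1) 0 + g := by
          rw [← pv_getD_eq ys i hilt, hprev]
          linarith
        rw [pvB_run_unfold, dif_pos hilt, if_pos hcase]
        apply ih (i + 1) ys w g (by omega) hw (by omega) (by omega)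
        intro j hj hji
        rcases Nat.lt_succ_iff_lt_or_eq.mp hji with hlt | heq
        · exact hinv j hj hlt
        · subst heq
          rw [pv_getD_eq ys j hj, hcase, hprev]
          ring
      · rename_i hc
        have hcase : ¬(ys[i]'hilt = ys.getD (i - 1) 0 + g) := by
          intro hh
          apply hc
          rw [pv_clist_get_lt ys w i hilt, pv_clist_getD_lt ys w 0 (by omega),
            pv_getD_eq ys i hilt, hh, hprev]
          ring
        rw [if_neg (by rintro ⟨h1, -⟩; omega), pvB_run_unfold, dif_pos hilt, if_neg hcase]

lemma pv_loop_eq_nil (w : Int) (fa fb : Nat) (acc : List String) (hfa : 0 < fa) :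
    pvA_loop fa (([] : List Int).map (fun v => 2 * v) ++ [w]) acc = pvB_loop fb [] acc := by
  obtain ⟨fa', rfl⟩ : ∃ fa', fa = fa' + 1 := ⟨fa - 1, by omega⟩
  rw [pvA_loop]
  rw [if_neg (by simp)]
  cases fb with
  | zero => rw [pvB_loop]
  | succ fb' => rw [pvB_loop, if_pos rfl]

-- the main loop correspondence A ↔ peel
lemma pv_loop_eq (n : Nat) : ∀ (ys : List Int) (w : Int) (fa fb : Nat) (acc : List String),
    ys.length ≤ n → ys.length < fa → ys.length ≤ fb → ys.Pairwise (· < ·) → w % 2 = 1 →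
    pvA_loop fa (ys.map (fun v => 2 * v) ++ [w]) acc = pvB_loop fb ys acc := by
  induction n with
  | zero =>
    intro ys w fa fb acc hn hfa hfb hp hw
    have hys : ys = [] := by
      cases ys with
      | nil => rfl
      | cons a t => simp at hn
    subst hys
    exact pv_loop_eq_nil w fa fb acc hfa
  | succ n ih =>
    intro ys w fa fb acc hn hfa hfb hp hw
    cases ys with
    | nil => exact pv_loop_eq_nil w fa fb acc hfa
    | cons a t =>
      obtain ⟨fa', rfl⟩ : ∃ fa', fa = fa' + 1 := ⟨fa - 1, by omega⟩
      obtain ⟨fb', rfl⟩ : ∃ fb', fb = fb' + 1 := ⟨fb - 1, by simp at hfb; omega⟩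
      have hscan0 : pvA_scan ((a :: t).map (fun v => 2 * v) ++ [w]) 0 2
          = pvA_scan ((a :: t).map (fun v => 2 * v) ++ [w]) 1 2 := by
        rw [pvA_scan_unfold, dif_pos (by simp)]
        rw [if_pos (by simp)]
      simp only [pvA_loop, pvB_loop]
      have hgt1 : (List.map (fun v => 2 * v) (a :: t) ++ [w]).length > 1 := by
        simp only [List.length_append, List.length_map, List.length_cons, List.length_nil]
        omega
      rw [if_pos hgt1]
      have hne : ¬(a :: t = []) := by simp
      rw [if_neg hne]
      cases t with
      | nil =>
        have hscanA : pvA_scan ((a :: ([] : List Int)).map (fun v => 2 * v) ++ [w]) 0 2 = (1, 2) := by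
          rw [hscan0, pvA_scan_unfold, dif_pos (by simp)]
          rw [if_neg (by
            simp only [List.map_cons, List.map_nil, List.nil_append, List.cons_append,
              List.getElem_cons_succ, List.getElem_cons_zero, List.getD_cons_zero]
            push_cast
            omega)]
          rw [if_neg (by rintro ⟨-, hgt, -⟩; simp at hgt)]
        rw [hscanA]
        rw [if_neg (show ¬(2 ≤ (a :: ([] : List Int)).length ∧ _) by rintro ⟨h2, -⟩; simp at h2)]
        rw [if_neg (show ¬(3 ≤ (a :: ([] : List Int)).length ∧ _) by rintro ⟨h3, -⟩; simp at h3)]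
        simp only []
        rw [if_pos (by simp)]
        rw [pv_getD_take _ 1 (by omega)]
        have hd0 : ((a :: ([] : List Int)).map (fun v => 2 * v) ++ [w]).getD 0 0 = 2 * a := by simp
        rw [hd0, pv_two_mul_div, pv_drop_clist _ _ 1 (by simp)]
        simp only [List.getD_cons_zero, List.drop_succ_cons, List.drop_zero]
        exact ih [] w fa' fb' (acc ++ [PySem.Int.toStr (a + 1)]) (by simp)
          (by simp only [List.length_nil, List.length_cons] at hfa ⊢; omega)
          (by simp only [List.length_nil]; omega) (by simp) hw
      | cons b u =>
        by_cases hb : b = a + 1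
        · have hlen2 : 2 ≤ (a :: b :: u).length := by simp only [List.length_cons]; omega
          have hscanA : pvA_scan ((a :: b :: u).map (fun v => 2 * v) ++ [w]) 0 2
              = (pvB_run (a :: b :: u) 1 2, 2) := by
            rw [hscan0, pvA_scan_unfold, dif_pos (by simp)]
            rw [if_pos (by
              simp only [List.map_cons, List.cons_append, List.getElem_cons_succ,
                List.getElem_cons_zero, List.getD_cons_zero]
              push_cast
              omega)]
            have h := pv_scan_run (a :: b :: u).length 2 (a :: b :: u) w 1 (by omega) hw
              (by omega) hlen2 (by
                intro j hjlen hj2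
                interval_cases j
                · simp
                · simp only [List.getD_cons_succ, List.getD_cons_zero]
                  push_cast
                  omega)
            simpa using h
          have hrunB : pvB_run (a :: b :: u) 1 1 = pvB_run (a :: b :: u) 1 2 := by
            rw [pvB_run_unfold, dif_pos (by simp only [List.length_cons]; omega)]
            rw [if_pos (by
              simp only [Nat.sub_self, List.getElem_cons_succ, List.getElem_cons_zero,
                List.getD_cons_zero]
              omega)]
          have hkb := pv_run_bounds (a :: b :: u).length (a :: b :: u) 1 2 (by omega)
          have hk2 : 2 ≤ pvB_run (a :: b :: u) 1 2 := hkb.1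
          have hkle : pvB_run (a :: b :: u) 1 2 ≤ (a :: b :: u).length := by
            have h2 := hkb.2
            simp only [List.length_cons] at h2 ⊢
            omega
          rw [hscanA]
          rw [if_pos (show 2 ≤ (a :: b :: u).length ∧ (a :: b :: u).getD 1 0 = (a :: b :: u).getD 0 0 + 1 by
            exact ⟨hlen2, by simp only [List.getD_cons_succ, List.getD_cons_zero]; omega⟩)]
          simp only [hrunB]
          have hlen_ne : ¬((List.take (pvB_run (a :: b :: u) 1 2) (List.map (fun v => 2 * v) (a :: b :: u) ++ [w])).length = 1) := by
            rw [List.length_take]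
            simp only [List.length_append, List.length_map, List.length_cons, List.length_nil]
            omega
          rw [if_neg hlen_ne]
          simp only [if_true]
          rw [pv_getD_take _ _ (by omega)]
          have hd0 : ((a :: b :: u).map (fun v => 2 * v) ++ [w]).getD 0 0 = 2 * a := by simp
          rw [hd0, pv_two_mul_div]
          rw [pv_getLastD_take _ _ (by omega) (by simp only [List.length_append, List.length_map, List.length_cons, List.length_nil] at hkle ⊢; omega)]
          rw [pv_clist_getD_lt _ _ _ (by omega), pv_two_mul_div]
          rw [pv_drop_clist _ _ _ hkle]
          simp only [List.getD_cons_zero]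
          exact ih ((a :: b :: u).drop (pvB_run (a :: b :: u) 1 2)) w fa' fb' _
            (by simp only [List.length_drop, List.length_cons]; simp at hn; omega)
            (by simp only [List.length_drop, List.length_cons]; simp at hfa; omega)
            (by simp only [List.length_drop, List.length_cons]; simp at hfb; omega)
            (hp.sublist (List.drop_sublist _ _)) hw
        · cases u with
          | nil =>
            have hscanA : pvA_scan ((a :: b :: ([] : List Int)).map (fun v => 2 * v) ++ [w]) 0 2 = (1, 2) := by
              rw [hscan0, pvA_scan_unfold, dif_pos (by simp)]
              rw [if_neg (by
                simp only [List.map_cons, List.map_nil, List.nil_append, List.cons_append,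
                  List.getElem_cons_succ, List.getElem_cons_zero, List.getD_cons_zero]
                push_cast
                omega)]
              rw [if_neg (by rintro ⟨-, hgt, -⟩; simp at hgt)]
            rw [hscanA]
            rw [if_neg (show ¬(2 ≤ (a :: b :: ([] : List Int)).length ∧ (a :: b :: ([] : List Int)).getD 1 0 = (a :: b :: ([] : List Int)).getD 0 0 + 1) by
              rintro ⟨-, hc⟩
              simp only [List.getD_cons_succ, List.getD_cons_zero] at hc
              omega)]
            rw [if_neg (show ¬(3 ≤ (a :: b :: ([] : List Int)).length ∧ _) by rintro ⟨h3, -⟩; simp at h3)]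
            simp only []
            rw [if_pos (by simp)]
            rw [pv_getD_take _ 1 (by omega)]
            have hd0 : ((a :: b :: ([] : List Int)).map (fun v => 2 * v) ++ [w]).getD 0 0 = 2 * a := by simp
            rw [hd0, pv_two_mul_div, pv_drop_clist _ _ 1 (by simp)]
            simp only [List.getD_cons_zero, List.drop_succ_cons, List.drop_zero]
            exact ih (b :: []) w fa' fb' _ (by simp at hn ⊢; omega) (by simp at hfa ⊢; omega)
              (by simp at hfb ⊢; omega) (hp.sublist (List.drop_sublist 1 (a :: b :: ([] : List Int)))) hw
          | cons c v =>
            by_cases hap : c - b = b - a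
            · have hlen3 : 3 ≤ (a :: b :: c :: v).length := by simp only [List.length_cons]; omega
              have hscanA : pvA_scan ((a :: b :: c :: v).map (fun v => 2 * v) ++ [w]) 0 2
                  = (pvB_run (a :: b :: c :: v) (b - a) 3, 2 * (b - a)) := by
                rw [hscan0, pvA_scan_unfold, dif_pos (by simp)]
                rw [if_neg (by
                  simp only [List.map_cons, List.cons_append, List.getElem_cons_succ,
                    List.getElem_cons_zero, List.getD_cons_zero]
                  push_cast
                  omega)]
                have helif : (1:Nat) = 1 ∧ (List.map (fun x => 2 * x) (a :: b :: c :: v) ++ [w]).length > 3 ∧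
                    (List.map (fun x => 2 * x) (a :: b :: c :: v) ++ [w]).getD (1 + 1) 0 -
                        (List.map (fun x => 2 * x) (a :: b :: c :: v) ++ [w])[1]'(by simp) =
                      (List.map (fun x => 2 * x) (a :: b :: c :: v) ++ [w])[1]'(by simp) -
                        (List.map (fun x => 2 * x) (a :: b :: c :: v) ++ [w]).getD 0 0 := by
                  refine ⟨rfl, by simp only [List.length_append, List.length_map, List.length_cons, List.length_nil]; omega, ?_⟩
                  simp only [List.map_cons, List.cons_append, List.getElem_cons_succ,
                    List.getElem_cons_zero, List.getD_cons_succ, List.getD_cons_zero]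
                  omega
                rw [if_pos helif]
                have hstep : ((a :: b :: c :: v).map (fun x => 2 * x) ++ [w])[1]'(by simp)
                    - ((a :: b :: c :: v).map (fun x => 2 * x) ++ [w]).getD 0 0 = 2 * (b - a) := by
                  simp only [List.map_cons, List.cons_append, List.getElem_cons_succ,
                    List.getElem_cons_zero, List.getD_cons_zero]
                  ring
                rw [hstep]
                have hone : pvA_scan ((a :: b :: c :: v).map (fun x => 2 * x) ++ [w]) 2 (2 * (b - a))
                    = pvA_scan ((a :: b :: c :: v).map (fun x => 2 * x) ++ [w]) 3 (2 * (b - a)) := by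
                  rw [pvA_scan_unfold, dif_pos (by simp)]
                  rw [if_pos (by
                    simp only [List.map_cons, List.cons_append, List.getElem_cons_succ,
                      List.getElem_cons_zero, List.getD_cons_zero]
                    push_cast
                    omega)]
                rw [hone]
                exact pv_scan_run (a :: b :: c :: v).length 3 (a :: b :: c :: v) w (b - a)
                  (by omega) hw (by omega) hlen3 (by
                    intro j hjlen hj3
                    interval_cases j
                    · simp
                    · simp only [List.getD_cons_succ, List.getD_cons_zero]
                      push_cast
                      omega
                    · simp only [List.getD_cons_succ, List.getD_cons_zero]
                      push_cast
                      omega)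
              have hrunB : pvB_run (a :: b :: c :: v) (b - a) 1 = pvB_run (a :: b :: c :: v) (b - a) 3 := by
                rw [pvB_run_unfold, dif_pos (by simp only [List.length_cons]; omega)]
                rw [if_pos (by
                  simp only [Nat.sub_self, List.getElem_cons_succ, List.getElem_cons_zero,
                    List.getD_cons_zero]
                  omega)]
                rw [pvB_run_unfold, dif_pos (by simp only [List.length_cons]; omega)]
                rw [if_pos (by
                  simp only [Nat.add_sub_cancel, List.getElem_cons_succ, List.getElem_cons_zero,
                    List.getD_cons_succ, List.getD_cons_zero]
                  omega)]
              have hkb := pv_run_bounds (a :: b :: c :: v).length (a :: b :: c :: v) (b - a) 3 (by omega)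
              have hk3 : 3 ≤ pvB_run (a :: b :: c :: v) (b - a) 3 := hkb.1
              have hkle : pvB_run (a :: b :: c :: v) (b - a) 3 ≤ (a :: b :: c :: v).length := by
                have h2 := hkb.2
                simp only [List.length_cons] at h2 ⊢
                omega
              rw [hscanA]
              rw [if_neg (show ¬(2 ≤ (a :: b :: c :: v).length ∧ (a :: b :: c :: v).getD 1 0 = (a :: b :: c :: v).getD 0 0 + 1) by
                rintro ⟨-, hc⟩
                simp only [List.getD_cons_succ, List.getD_cons_zero] at hc
                omega)]
              rw [if_pos (show 3 ≤ (a :: b :: c :: v).length ∧ (a :: b :: c :: v).getD 2 0 - (a :: b :: c :: v).getD 1 0 = (a :: b :: c :: v).getD 1 0 - (a :: b :: c :: v).getD 0 0 by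
                exact ⟨hlen3, by simp only [List.getD_cons_succ, List.getD_cons_zero]; omega⟩)]
              simp only [List.getD_cons_succ, List.getD_cons_zero]
              rw [hrunB]
              have hlen_ne : ¬((List.take (pvB_run (a :: b :: c :: v) (b - a) 3) (List.map (fun x => 2 * x) (a :: b :: c :: v) ++ [w])).length = 1) := by
                rw [List.length_take]
                simp only [List.length_append, List.length_map, List.length_cons, List.length_nil]
                omega
              rw [if_neg hlen_ne]
              have hstep_ne : ¬((2 : Int) * (b - a) = 2) := by omega
              rw [if_neg hstep_ne]
              rw [pv_getD_take _ _ (by omega)]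
              have hd0 : ((a :: b :: c :: v).map (fun x => 2 * x) ++ [w]).getD 0 0 = 2 * a := by simp
              rw [hd0, pv_two_mul_div]
              rw [pv_getLastD_take _ _ (by omega) (by simp only [List.length_append, List.length_map, List.length_cons, List.length_nil] at hkle ⊢; omega)]
              rw [pv_clist_getD_lt _ _ _ (by simp only [List.length_cons] at hkle ⊢; omega), pv_two_mul_div]
              rw [pv_two_mul_div]
              rw [pv_drop_clist _ _ _ hkle]
              exact ih ((a :: b :: c :: v).drop (pvB_run (a :: b :: c :: v) (b - a) 3)) w fa' fb' _
                (by simp only [List.length_drop, List.length_cons]; simp at hn; omega)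
                (by simp only [List.length_drop, List.length_cons]; simp at hfa; omega)
                (by simp only [List.length_drop, List.length_cons]; simp at hfb; omega)
                (hp.sublist (List.drop_sublist _ _)) hw
            · have hscanA : pvA_scan ((a :: b :: c :: v).map (fun x => 2 * x) ++ [w]) 0 2 = (1, 2) := by
                rw [hscan0, pvA_scan_unfold, dif_pos (by simp)]
                rw [if_neg (by
                  simp only [List.map_cons, List.cons_append, List.getElem_cons_succ,
                    List.getElem_cons_zero, List.getD_cons_zero]
                  push_cast
                  omega)]
                rw [if_neg (by
                  rintro ⟨-, -, hc⟩
                  simp only [List.map_cons, List.cons_append, List.getElem_cons_succ,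
                    List.getElem_cons_zero, List.getD_cons_succ, List.getD_cons_zero] at hc
                  omega)]
              rw [hscanA]
              rw [if_neg (show ¬(2 ≤ (a :: b :: c :: v).length ∧ (a :: b :: c :: v).getD 1 0 = (a :: b :: c :: v).getD 0 0 + 1) by
                rintro ⟨-, hc⟩
                simp only [List.getD_cons_succ, List.getD_cons_zero] at hc
                omega)]
              rw [if_neg (show ¬(3 ≤ (a :: b :: c :: v).length ∧ (a :: b :: c :: v).getD 2 0 - (a :: b :: c :: v).getD 1 0 = (a :: b :: c :: v).getD 1 0 - (a :: b :: c :: v).getD 0 0) by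
                rintro ⟨-, hc⟩
                simp only [List.getD_cons_succ, List.getD_cons_zero] at hc
                omega)]
              simp only []
              rw [if_pos (by simp)]
              rw [pv_getD_take _ 1 (by omega)]
              have hd0 : ((a :: b :: c :: v).map (fun x => 2 * x) ++ [w]).getD 0 0 = 2 * a := by simp
              rw [hd0, pv_two_mul_div, pv_drop_clist _ _ 1 (by simp)]
              simp only [List.getD_cons_zero, List.drop_succ_cons, List.drop_zero]
              exact ih (b :: c :: v) w fa' fb' _ (by simp at hn ⊢; omega) (by simp at hfa ⊢; omega)
                (by simp at hfb ⊢; omega) (hp.sublist (List.drop_sublist 1 (a :: b :: c :: v))) hw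

-- ===== the peel ↔ run-fold correspondence =====

-- structural gap sequence and expansion of a run list
def pvDiffs : List Int → List Int
  | x :: y :: t => (y - x) :: pvDiffs (y :: t)
  | _ => []

def pvExpand (rs : List (Int × Nat)) : List Int :=
  rs.flatMap (fun r => List.replicate r.2 r.1)

lemma pv_diffs_eq_zip (xs : List Int) :
    (xs.zip (xs.drop 1)).map (fun p => p.2 - p.1) = pvDiffs xs := by
  match xs with
  | [] => rfl
  | [x] => rfl
  | x :: y :: t =>
    have := pv_diffs_eq_zip (y :: t)
    simp only [pvDiffs, List.drop_succ_cons, List.drop_zero, List.zip_cons_cons, List.map_cons]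
    rw [← this]
    simp

lemma pv_diffs_length (xs : List Int) : (pvDiffs xs).length = xs.length - 1 := by
  match xs with
  | [] => rfl
  | [x] => rfl
  | x :: y :: t =>
    have := pv_diffs_length (y :: t)
    simp only [pvDiffs, List.length_cons] at this ⊢
    omega

lemma pv_diffs_getD (xs : List Int) : ∀ (i : Nat), i < (pvDiffs xs).length →
    xs.getD (i + 1) 0 = xs.getD i 0 + (pvDiffs xs).getD i 0 := by
  match xs with
  | [] => intro i h; simp [pvDiffs] at h
  | [x] => intro i h; simp [pvDiffs] at h
  | x :: y :: t =>
    intro i h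
    cases i with
    | zero => simp [pvDiffs]
    | succ i' =>
      have := pv_diffs_getD (y :: t) i' (by simpa [pvDiffs] using h)
      simpa [pvDiffs] using this

lemma pv_diffs_drop (xs : List Int) : ∀ (k : Nat), pvDiffs (xs.drop k) = (pvDiffs xs).drop k := by
  match xs with
  | [] => intro k; simp [pvDiffs]
  | [x] => intro k; cases k <;> simp [pvDiffs]
  | x :: y :: t =>
    intro k
    cases k with
    | zero => simp
    | succ k' =>
      have := pv_diffs_drop (y :: t) k'
      simpa [pvDiffs] using this

-- proof-only: the same RLE computed by front recursion, and the foldl/recursion bridge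
def pvRleR : List Int → List (Int × Nat)
  | [] => []
  | g :: ds =>
    match pvRleR ds with
    | (g', c) :: rest => if g' = g then (g, c + 1) :: rest else (g, 1) :: (g', c) :: rest
    | [] => [(g, 1)]

lemma pvRleStep_ne_nil (runs : List (Int × Nat)) (g : Int) : pvRleStep runs g ≠ [] := by
  unfold pvRleStep
  rcases h : runs.getLast? with _ | ⟨g', c⟩
  · simp
  · by_cases hg : g' = g <;> simp [hg]

lemma pvRleStep_append (rs l : List (Int × Nat)) (g : Int) (hl : l ≠ []) :
    pvRleStep (rs ++ l) g = rs ++ pvRleStep l g := by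
  unfold pvRleStep
  rw [List.getLast?_append_of_ne_nil rs hl, List.dropLast_append_of_ne_nil hl]
  rcases h : l.getLast? with _ | ⟨g', c⟩
  · exact absurd (List.getLast?_eq_none_iff.mp h) hl
  · by_cases hg : g' = g <;> simp [hg]

lemma pv_foldl_prefix : ∀ (ds : List Int) (rs l : List (Int × Nat)), l ≠ [] →
    ds.foldl pvRleStep (rs ++ l) = rs ++ ds.foldl pvRleStep l := by
  intro ds
  induction ds with
  | nil => intro rs l hl; simp
  | cons d ds' ih =>
    intro rs l hl
    rw [List.foldl_cons, List.foldl_cons, pvRleStep_append rs l d hl,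
      ih rs (pvRleStep l d) (pvRleStep_ne_nil l d)]

lemma pv_foldl_block : ∀ (ds : List Int) (g : Int) (c : Nat),
    ds.foldl pvRleStep [(g, c)] =
      (match pvRleR ds with
       | (g2, c2) :: rest => if g2 = g then (g, c + c2) :: rest else (g, c) :: (g2, c2) :: rest
       | [] => [(g, c)]) := by
  intro ds
  induction ds with
  | nil => intro g c; rfl
  | cons d ds' ih =>
    intro g c
    rw [List.foldl_cons]
    by_cases hgd : g = d
    · subst hgd
      have hstep : pvRleStep [(g, c)] g = [(g, c + 1)] := by simp [pvRleStep]
      rw [hstep, ih]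
      rcases h : pvRleR ds' with _ | ⟨⟨g2, c2⟩, rest⟩
      · have hred : pvRleR (g :: ds') = [(g, 1)] := by simp [pvRleR, h]
        rw [hred]
        simp
      · by_cases hg2 : g2 = g
        · subst hg2
          have hred : pvRleR (g2 :: ds') = (g2, c2 + 1) :: rest := by simp [pvRleR, h]
          rw [hred]
          simp [show c + 1 + c2 = c + (c2 + 1) from by omega]
        · have hred : pvRleR (g :: ds') = (g, 1) :: (g2, c2) :: rest := by
            simp [pvRleR, h, hg2]
          rw [hred]
          simp [hg2]
    · have hstep : pvRleStep [(g, c)] d = [(g, c), (d, 1)] := by simp [pvRleStep, hgd]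
      have hgd' : ¬(d = g) := fun e => hgd e.symm
      rw [hstep,
        show ([(g, c), (d, 1)] : List (Int × Nat)) = [(g, c)] ++ [(d, 1)] from rfl,
        pv_foldl_prefix ds' [(g, c)] [(d, 1)] (by simp), ih]
      rcases h : pvRleR ds' with _ | ⟨⟨g2, c2⟩, rest⟩
      · have hred : pvRleR (d :: ds') = [(d, 1)] := by simp [pvRleR, h]
        rw [hred]
        simp [hgd']
      · by_cases hg2 : g2 = d
        · subst hg2
          have hred : pvRleR (g2 :: ds') = (g2, c2 + 1) :: rest := by simp [pvRleR, h]
          rw [hred]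
          simp [hgd', show 1 + c2 = c2 + 1 from by omega]
        · have hred : pvRleR (d :: ds') = (d, 1) :: (g2, c2) :: rest := by
            simp [pvRleR, h, hg2]
          rw [hred]
          simp [hg2, hgd']

lemma pv_rle_eq_rec (ds : List Int) : pvRle ds = pvRleR ds := by
  cases ds with
  | nil => rfl
  | cons d ds' =>
    unfold pvRle
    rw [List.foldl_cons, show pvRleStep [] d = [(d, 1)] from rfl, pv_foldl_block ds' d 1]
    rcases h : pvRleR ds' with _ | ⟨⟨g2, c2⟩, rest⟩
    · have hred : pvRleR (d :: ds') = [(d, 1)] := by simp [pvRleR, h]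
      rw [hred]
    · by_cases hg2 : g2 = d
      · subst hg2
        have hred : pvRleR (g2 :: ds') = (g2, c2 + 1) :: rest := by simp [pvRleR, h]
        rw [hred]
        simp [show 1 + c2 = c2 + 1 from by omega]
      · have hred : pvRleR (d :: ds') = (d, 1) :: (g2, c2) :: rest := by
          simp [pvRleR, h, hg2]
        rw [hred]
        simp [hg2]

lemma pv_rleR_expand (ds : List Int) : pvExpand (pvRleR ds) = ds := by
  match ds with
  | [] => rfl
  | g :: ds' =>
    have ih := pv_rleR_expand ds'
    rcases h : pvRleR ds' with _ | ⟨⟨g', c⟩, rest⟩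
    · rw [h] at ih
      simp only [pvRleR, h]
      simp only [pvExpand, List.flatMap_nil] at ih
      simp [pvExpand, ← ih]
    · rw [h] at ih
      by_cases hg : g' = g
      · subst hg
        simp only [pvRleR, h, if_pos rfl]
        simp only [pvExpand, List.flatMap_cons] at ih ⊢
        rw [← ih]
        simp [List.replicate_succ]
      · simp only [pvRleR, h, if_neg hg]
        simp only [pvExpand, List.flatMap_cons] at ih ⊢
        rw [← ih]
        simp [List.replicate_succ]

lemma pv_rleR_pos (ds : List Int) : ∀ p ∈ pvRleR ds, 1 ≤ p.2 := by
  match ds with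
  | [] => intro p hp; simp [pvRleR] at hp
  | g :: ds' =>
    intro p hp
    have ih := pv_rleR_pos ds'
    rcases h : pvRleR ds' with _ | ⟨⟨g', c⟩, rest⟩
    · simp only [pvRleR, h] at hp
      simp at hp
      subst hp
      simp
    · by_cases hg : g' = g
      · subst hg
        simp only [pvRleR, h, if_pos rfl] at hp
        rcases List.mem_cons.mp hp with h1 | h1
        · subst h1; simp
        · exact ih p (h ▸ List.mem_cons_of_mem _ h1)
      · simp only [pvRleR, h, if_neg hg] at hp
        rcases List.mem_cons.mp hp with h1 | h1
        · subst h1; simp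
        · exact ih p (h ▸ h1)

lemma pv_rleR_chain (ds : List Int) : (pvRleR ds).IsChain (fun a b => a.1 ≠ b.1) := by
  match ds with
  | [] => exact List.isChain_nil
  | g :: ds' =>
    have ih := pv_rleR_chain ds'
    rcases h : pvRleR ds' with _ | ⟨⟨g', c⟩, rest⟩
    · have hred : pvRleR (g :: ds') = [(g, 1)] := by simp [pvRleR, h]
      rw [hred]
      exact List.isChain_singleton _
    · rw [h] at ih
      by_cases hg : g' = g
      · subst hg
        have hred : pvRleR (g' :: ds') = (g', c + 1) :: rest := by simp [pvRleR, h]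
        rw [hred]
        cases rest with
        | nil => exact List.isChain_singleton _
        | cons q t =>
          rw [List.isChain_cons_cons] at ih ⊢
          exact ⟨ih.1, ih.2⟩
      · have hred : pvRleR (g :: ds') = (g, 1) :: (g', c) :: rest := by
          simp [pvRleR, h, hg]
        rw [hred, List.isChain_cons_cons]
        exact ⟨fun hc => hg hc.symm, ih⟩

-- getD across drop
lemma pv_getD_drop (xs : List Int) (p i : Nat) : (xs.drop p).getD i 0 = xs.getD (p + i) 0 := by
  simp [List.getD_eq_getElem?_getD, List.getElem?_drop]

-- run helper counts the leading block of g-gaps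
lemma pv_run_shift (m : Nat) : ∀ (y : Int) (ys : List Int) (g : Int) (k : Nat),
    ys.length - k ≤ m → 1 ≤ k → pvB_run (y :: ys) g (k + 1) = 1 + pvB_run ys g k := by
  induction m with
  | zero =>
    intro y ys g k hm hk
    rw [pvB_run_unfold, dif_neg (by simp; omega)]
    conv_rhs => rw [pvB_run_unfold]
    rw [dif_neg (by omega)]
    omega
  | succ m ih =>
    intro y ys g k hm hk
    by_cases hlt : k < ys.length
    · rw [pvB_run_unfold, dif_pos (by simp; omega)]
      conv_rhs => rw [pvB_run_unfold]
      rw [dif_pos hlt]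
      have hidx : (y :: ys)[k + 1]'(by simp; omega) = ys[k]'hlt := by simp
      have hgd : (y :: ys).getD (k + 1 - 1) 0 = ys.getD (k - 1) 0 := by
        have h' : k + 1 - 1 = (k - 1) + 1 := by omega
        rw [h']
        simp
      by_cases hc : ys[k]'hlt = ys.getD (k - 1) 0 + g
      · rw [if_pos (by rw [hidx, hgd]; exact hc), if_pos hc]
        exact ih y ys g (k + 1) (by omega) (by omega)
      · rw [if_neg (by rw [hidx, hgd]; exact hc), if_neg hc]
        omega
    · rw [pvB_run_unfold, dif_neg (by simp; omega)]
      conv_rhs => rw [pvB_run_unfold]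
      rw [dif_neg hlt]
      omega

lemma pv_run_count (r : Nat) : ∀ (ys : List Int) (g : Int) (rest' : List Int),
    pvDiffs ys = List.replicate r g ++ rest' →
    (∀ h, rest'.head? = some h → h ≠ g) →
    pvB_run ys g 1 = r + 1 := by
  induction r with
  | zero =>
    intro ys g rest' hd hh
    rw [pvB_run_unfold]
    by_cases hlt : 1 < ys.length
    · rw [dif_pos hlt]
      have hd0 : ys.getD 1 0 = ys.getD 0 0 + (pvDiffs ys).getD 0 0 :=
        pv_diffs_getD ys 0 (by rw [pv_diffs_length]; omega)
      have hhead : (pvDiffs ys).getD 0 0 ≠ g := by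
        rw [hd]
        simp only [List.replicate_zero, List.nil_append]
        cases rest' with
        | nil =>
          exfalso
          have := pv_diffs_length ys
          rw [hd] at this
          simp at this
          omega
        | cons h t => exact hh h (by simp)
      rw [if_neg (by
        rw [← pv_getD_eq ys 1 hlt]
        simp only [Nat.sub_self]
        intro hc
        apply hhead
        omega)]
    · rw [dif_neg hlt]
  | succ r' ih =>
    intro ys g rest' hd hh
    match ys with
    | [] => simp [pvDiffs] at hd
    | [x] => simp [pvDiffs] at hd
    | x :: y :: t =>
      simp only [pvDiffs, List.replicate_succ, List.cons_append, List.cons.injEq] at hd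
      obtain ⟨hxy, hrest⟩ := hd
      rw [pvB_run_unfold, dif_pos (by simp)]
      rw [if_pos (by simp only [Nat.sub_self, List.getElem_cons_succ, List.getElem_cons_zero, List.getD_cons_zero]; omega)]
      rw [pv_run_shift ((y :: t).length) x (y :: t) g 1 (by omega) (by omega)]
      rw [ih (y :: t) g rest' hrest hh]
      omega

lemma pv_expand_head_ne (g : Int) (rest : List (Int × Nat))
    (hpos : ∀ p ∈ rest, 1 ≤ p.2)
    (hch : ∀ q ∈ rest.head?, q.1 ≠ g) :
    ∀ h, (pvExpand rest).head? = some h → h ≠ g := by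
  intro h hh
  match rest with
  | [] => simp [pvExpand] at hh
  | (g2, c2) :: t =>
    have hc2 : 1 ≤ c2 := hpos (g2, c2) (by simp)
    have hg2 : (g2, c2).1 ≠ g := hch (g2, c2) (by simp)
    simp only [pvExpand, List.flatMap_cons] at hh
    obtain ⟨c2', rfl⟩ : ∃ c2', c2 = c2' + 1 := ⟨c2 - 1, by omega⟩
    simp [List.replicate_succ] at hh
    rw [← hh]
    exact hg2

-- helper getD facts for replicate-prefixed lists
lemma pv_getD_repl (r : Nat) (g : Int) (t : List Int) (i : Nat) (h : i < r) :
    (List.replicate r g ++ t).getD i 0 = g := by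
  rw [List.getD_eq_getElem?_getD, List.getElem?_append_left (by simpa using h),
    List.getElem?_replicate]
  simp [h]

-- MAIN: the run-fold (with the final-singleton fix-up) equals the peel loop
lemma pv_fold_eq : ∀ (rs : List (Int × Nat)) (xs : List Int) (pos j : Nat) (parts : List String) (fb : Nat),
    (pvDiffs xs).drop j = pvExpand rs →
    j ≤ pos → pos ≤ j + 1 → pos ≤ xs.length → 1 ≤ xs.length →
    (∀ p ∈ rs, 1 ≤ p.2) → rs.IsChain (fun a b => a.1 ≠ b.1) →
    xs.length - pos ≤ fb →
    (if (pvB_fold xs rs (parts, pos, j)).2.1 = xs.length - 1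
      then (pvB_fold xs rs (parts, pos, j)).1
        ++ [PySem.Int.toStr (xs.getD (pvB_fold xs rs (parts, pos, j)).2.1 0 + 1)]
      else (pvB_fold xs rs (parts, pos, j)).1)
      = pvB_loop fb (xs.drop pos) parts := by
  intro rs
  induction rs with
  | nil =>
    intro xs pos j parts fb hdrop hjp hpj hpl hl hpos hch hfb
    simp only [pvB_fold]
    have hdl0 : (pvDiffs xs).length ≤ j := by
      by_contra hcon
      push_neg at hcon
      have := congrArg List.length hdrop
      simp [List.length_drop, pvExpand] at this
      omega
    rw [pv_diffs_length] at hdl0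
    rcases Nat.lt_or_ge pos xs.length with hlt | hge
    · -- pos = xs.length - 1: one element left
      have hpe : pos = xs.length - 1 := by omega
      rw [if_pos hpe]
      obtain ⟨fb', rfl⟩ : ∃ fb', fb = fb' + 1 := ⟨fb - 1, by omega⟩
      rw [pvB_loop]
      have hne : xs.drop pos ≠ [] := by
        intro hc
        have := congrArg List.length hc
        simp [List.length_drop] at this
        omega
      rw [if_neg hne]
      have hlen1 : (xs.drop pos).length = 1 := by
        simp [List.length_drop]
        omega
      rw [if_neg (by rintro ⟨h2, -⟩; omega)]
      rw [if_neg (by rintro ⟨h3, -⟩; omega)]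
      have hdrop1 : (xs.drop pos).drop 1 = [] := by
        rw [List.drop_drop]
        exact List.drop_eq_nil_of_le (by omega)
      rw [hdrop1, pv_getD_drop]
      cases fb' with
      | zero => rw [pvB_loop]; simp
      | succ f => rw [pvB_loop, if_pos rfl]; simp
    · -- pos = xs.length: nothing left
      rw [if_neg (by omega)]
      have hnil : xs.drop pos = [] := List.drop_eq_nil_of_le (by omega)
      rw [hnil]
      cases fb with
      | zero => rw [pvB_loop]
      | succ f => rw [pvB_loop, if_pos rfl]
  | cons hd rest ih =>
    intro xs pos j parts fb hdrop hjp hpj hpl hl hpos hch hfb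
    obtain ⟨g, c⟩ := hd
    have hc1 : 1 ≤ c := hpos (g, c) (by simp)
    rw [show pvExpand ((g, c) :: rest) = List.replicate c g ++ pvExpand rest by
      simp [pvExpand]] at hdrop
    set E := (pvExpand rest).length with hE
    have hlendrop : (pvDiffs xs).length - j = c + E := by
      have := congrArg List.length hdrop
      simpa [List.length_drop] using this
    have hjlt : j ≤ (pvDiffs xs).length := by
      by_contra hcon
      push_neg at hcon
      omega
    have hdl : (pvDiffs xs).length = xs.length - 1 := pv_diffs_length xs
    have hn : xs.length = j + c + E + 1 := by omega
    have hdiffpos : pvDiffs (xs.drop pos) = List.replicate (c - (pos - j)) g ++ pvExpand rest := by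
      have h1 : (pvDiffs xs).drop pos = List.drop (pos - j) ((pvDiffs xs).drop j) := by
        rw [List.drop_drop]
        congr 1
        omega
      rw [pv_diffs_drop, h1, hdrop, List.drop_append_of_le_length (by simp; omega),
        List.drop_replicate]
    have hposrest : ∀ p ∈ rest, 1 ≤ p.2 := fun p hp => hpos p (List.mem_cons_of_mem _ hp)
    have hchrest : rest.IsChain (fun a b => a.1 ≠ b.1) := hch.tail
    have hheadne : ∀ h, (pvExpand rest).head? = some h → h ≠ g := by
      apply pv_expand_head_ne g rest hposrest
      intro q hq
      cases rest with
      | nil => simp at hq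
      | cons q0 t =>
        simp at hq
        subst hq
        exact fun e => (List.rel_of_isChain_cons_cons hch) e.symm
    have hdrop2 : (pvDiffs xs).drop (j + c) = pvExpand rest := by
      have h1 : (pvDiffs xs).drop (j + c) = List.drop c ((pvDiffs xs).drop j) := by
        rw [List.drop_drop]
      rw [h1, hdrop, List.drop_append_of_le_length (by simp), List.drop_replicate]
      simp
    rcases Nat.lt_or_ge (c - (pos - j)) 1 with hr0 | hr1
    · -- r = 0: skip this run (k = 1, c = 1)
      have hstep : pvB_fold xs ((g, c) :: rest) (parts, pos, j)
          = pvB_fold xs rest (parts, pos, j + c) := by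
        simp only [pvB_fold]
        rw [show c - (pos - j) = 0 from by omega]
        rw [if_neg (show ¬(1 ≤ (0:Nat) ∧ g = 1) from fun h => by omega),
          if_neg (show ¬((2:Nat) ≤ 0) from by omega),
          if_neg (show ¬((0:Nat) = 1) from by omega)]
      rw [hstep]
      exact ih xs pos (j + c) parts fb hdrop2 (by omega) (by omega) hpl hl hposrest hchrest hfb
    · -- r ≥ 1: this run produces one group
      have hys : (xs.drop pos).length = (c - (pos - j)) + E + 1 := by
        simp [List.length_drop]
        omega
      have hysne : xs.drop pos ≠ [] := by
        intro hc'
        have := congrArg List.length hc'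
        rw [hys] at this
        simp at this
      have hdyslen : (pvDiffs (xs.drop pos)).length = (c - (pos - j)) + E := by
        rw [hdiffpos]
        simp [hE]
      have hd0 : (pvDiffs (xs.drop pos)).getD 0 0 = g := by
        rw [hdiffpos]
        exact pv_getD_repl _ g _ 0 (by omega)
      have hys1 : (xs.drop pos).getD 1 0 = (xs.drop pos).getD 0 0 + g := by
        have := pv_diffs_getD (xs.drop pos) 0 (by omega)
        rw [hd0] at this
        simpa using this
      have hrun : pvB_run (xs.drop pos) g 1 = (c - (pos - j)) + 1 :=
        pv_run_count (c - (pos - j)) (xs.drop pos) g (pvExpand rest) hdiffpos hheadne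
      obtain ⟨fb', rfl⟩ : ∃ fb', fb = fb' + 1 := ⟨fb - 1, by omega⟩
      by_cases hg1 : g = 1
      · -- range group
        have hstep : pvB_fold xs ((g, c) :: rest) (parts, pos, j)
            = pvB_fold xs rest
                (parts ++ [PySem.Int.toStr (xs.getD pos 0 + 1) ++ "-" ++
                  PySem.Int.toStr (xs.getD (pos + (c - (pos - j))) 0 + 1)],
                 pos + (c - (pos - j)) + 1, j + c) := by
          simp only [pvB_fold]
          rw [if_pos (show 1 ≤ c - (pos - j) ∧ g = 1 from ⟨hr1, hg1⟩)]
        rw [hstep]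
        rw [ih xs (pos + (c - (pos - j)) + 1) (j + c) _ fb' hdrop2 (by omega) (by omega)
          (by omega) hl hposrest hchrest (by omega)]
        conv_rhs => rw [pvB_loop]
        rw [if_neg hysne]
        rw [if_pos (show 2 ≤ (xs.drop pos).length ∧
            (xs.drop pos).getD 1 0 = (xs.drop pos).getD 0 0 + 1 from
          ⟨by omega, by rw [hys1, hg1]⟩)]
        rw [← hg1, hrun]
        simp only [Nat.add_sub_cancel]
        rw [List.drop_drop, pv_getD_drop, pv_getD_drop]
        simp only [Nat.add_zero, ← Nat.add_assoc]
      · have hys1ne : ¬((xs.drop pos).getD 1 0 = (xs.drop pos).getD 0 0 + 1) := by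
          rw [hys1]
          intro hc'
          apply hg1
          omega
        rcases Nat.lt_or_ge (c - (pos - j)) 2 with hr1' | hr2
        · -- r = 1, g ≠ 1: singleton
          have hre : c - (pos - j) = 1 := by omega
          have hstep : pvB_fold xs ((g, c) :: rest) (parts, pos, j)
              = pvB_fold xs rest (parts ++ [PySem.Int.toStr (xs.getD pos 0 + 1)], pos + 1, j + c) := by
            simp only [pvB_fold]
            rw [if_neg (show ¬(1 ≤ c - (pos - j) ∧ g = 1) from fun h => hg1 h.2),
              if_neg (show ¬(2 ≤ c - (pos - j)) from by omega),
              if_pos hre]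
          rw [hstep]
          rw [ih xs (pos + 1) (j + c) _ fb' hdrop2 (by omega) (by omega)
            (by omega) hl hposrest hchrest (by omega)]
          conv_rhs => rw [pvB_loop]
          rw [if_neg hysne, if_neg (by rintro ⟨-, hc'⟩; exact hys1ne hc')]
          have hbr2 : ¬(3 ≤ (xs.drop pos).length ∧
              (xs.drop pos).getD 2 0 - (xs.drop pos).getD 1 0
                = (xs.drop pos).getD 1 0 - (xs.drop pos).getD 0 0) := by
            rintro ⟨h3, heq⟩
            have hE1 : 1 ≤ E := by omega
            obtain ⟨h0, t0, her⟩ : ∃ h0 t0, pvExpand rest = h0 :: t0 := by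
              cases her : pvExpand rest with
              | nil =>
                rw [her] at hE
                simp at hE
                omega
              | cons h0 t0 => exact ⟨h0, t0, rfl⟩
            have hh0 : h0 ≠ g := hheadne h0 (by rw [her]; rfl)
            have hd1 : (pvDiffs (xs.drop pos)).getD 1 0 = h0 := by
              rw [hdiffpos, hre, her]
              simp [List.replicate_succ]
            have hys2 : (xs.drop pos).getD 2 0 = (xs.drop pos).getD 1 0 + h0 := by
              have := pv_diffs_getD (xs.drop pos) 1 (by omega)
              rw [hd1] at this
              simpa using this
            rw [hys2, hys1] at heq
            exact hh0 (by omega)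
          rw [if_neg hbr2]
          rw [List.drop_drop, pv_getD_drop]
          simp only [Nat.add_zero, ← Nat.add_assoc]
        · -- r ≥ 2, g ≠ 1: arithmetic-step group
          have hd1 : (pvDiffs (xs.drop pos)).getD 1 0 = g := by
            rw [hdiffpos]
            exact pv_getD_repl _ g _ 1 (by omega)
          have hys2 : (xs.drop pos).getD 2 0 = (xs.drop pos).getD 1 0 + g := by
            have := pv_diffs_getD (xs.drop pos) 1 (by omega)
            rw [hd1] at this
            simpa using this
          have hstep : pvB_fold xs ((g, c) :: rest) (parts, pos, j)
              = pvB_fold xs rest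
                  (parts ++ [PySem.Int.toStr (xs.getD pos 0 + 1) ++ "-" ++
                    PySem.Int.toStr (xs.getD (pos + (c - (pos - j))) 0 + 1)
                    ++ "\\" ++ PySem.Int.toStr g],
                   pos + (c - (pos - j)) + 1, j + c) := by
            simp only [pvB_fold]
            rw [if_neg (show ¬(1 ≤ c - (pos - j) ∧ g = 1) from fun h => hg1 h.2),
              if_pos hr2]
          rw [hstep]
          rw [ih xs (pos + (c - (pos - j)) + 1) (j + c) _ fb' hdrop2 (by omega) (by omega)
            (by omega) hl hposrest hchrest (by omega)]
          conv_rhs => rw [pvB_loop]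
          rw [if_neg hysne, if_neg (by rintro ⟨-, hc'⟩; exact hys1ne hc')]
          rw [if_pos (show 3 ≤ (xs.drop pos).length ∧
              (xs.drop pos).getD 2 0 - (xs.drop pos).getD 1 0
                = (xs.drop pos).getD 1 0 - (xs.drop pos).getD 0 0 from
            ⟨by omega, by rw [hys2, hys1]; ring⟩)]
          rw [show (xs.drop pos).getD 1 0 - (xs.drop pos).getD 0 0 = g from by rw [hys1]; ring]
          rw [hrun]
          simp only [Nat.add_sub_cancel]
          rw [List.drop_drop, pv_getD_drop, pv_getD_drop]
          simp only [Nat.add_zero, ← Nat.add_assoc]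

-- sorted(set(xs)) nonempty for nonempty xs
lemma pv_sorted_ne_nil (orig_list : List Int) (h : orig_list ≠ []) :
    PySem.List.sorted (PySem.Set.ofList orig_list) (fun x => x) false ≠ [] := by
  intro hc
  rw [PySem.List.sorted_eq_nil_iff] at hc
  obtain ⟨x, hx⟩ := List.exists_mem_of_ne_nil _ h
  have : x ∈ PySem.Set.ofList orig_list := by
    rw [PySem.Set.mem_ofList]
    exact hx
  rw [hc] at this
  simp at this

-- ===== VERDICT (by name: the statement is the Claim_ definition above) =====
theorem compact4nexus_py_spec : Claim_equal_compact4nexus_py := by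
  intro orig_list _hdom
  unfold Spec_compact4nexus_py compact4nexus_py compact4nexus_py_alt
  by_cases hnil : orig_list = []
  · rw [if_pos hnil, if_pos hnil]
  · rw [if_neg hnil, if_neg hnil]
    set xs := PySem.List.sorted (PySem.Set.ofList orig_list) (fun x => x) false with hxs
    have hne : xs ≠ [] := pv_sorted_ne_nil orig_list hnil
    have h1 : 1 ≤ xs.length := List.length_pos_of_ne_nil hne
    have hA : pvA_loop (xs.map (fun v => 2 * v) ++ [2 * xs.getLastD 0 + 1]).length
        (xs.map (fun v => 2 * v) ++ [2 * xs.getLastD 0 + 1]) []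
        = pvB_loop xs.length xs [] := by
      apply pv_loop_eq xs.length xs (2 * xs.getLastD 0 + 1) _ xs.length []
        (le_refl _) (by simp) (le_refl _)
        (hxs ▸ PySem.List.sorted_ofList_pairwise_lt orig_list) (by omega)
    have hB := pv_fold_eq (pvRle (pvDiffs xs)) xs 0 0 [] xs.length
      (by rw [pv_rle_eq_rec]; simpa using (pv_rleR_expand (pvDiffs xs)).symm)
      (le_refl _) (by omega) (by omega) h1
      (by rw [pv_rle_eq_rec]; exact pv_rleR_pos (pvDiffs xs))
      (by rw [pv_rle_eq_rec]; exact pv_rleR_chain (pvDiffs xs)) (by omega)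
    have hzip := pv_diffs_eq_zip xs
    have hfinal :
        PySem.Str.join " " (pvA_loop (xs.map (fun v => 2 * v) ++ [2 * xs.getLastD 0 + 1]).length
          (xs.map (fun v => 2 * v) ++ [2 * xs.getLastD 0 + 1]) [])
        = PySem.Str.join " "
            (if (pvB_fold xs (pvRle ((xs.zip (xs.drop 1)).map (fun p => p.2 - p.1))) ([], 0, 0)).2.1 = xs.length - 1
              then (pvB_fold xs (pvRle ((xs.zip (xs.drop 1)).map (fun p => p.2 - p.1))) ([], 0, 0)).1
                ++ [PySem.Int.toStr (xs.getD (pvB_fold xs (pvRle ((xs.zip (xs.drop 1)).map (fun p => p.2 - p.1))) ([], 0, 0)).2.1 0 + 1)]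
              else (pvB_fold xs (pvRle ((xs.zip (xs.drop 1)).map (fun p => p.2 - p.1))) ([], 0, 0)).1) := by
      rw [hzip, hA, hB, List.drop_zero]
    exact hfinal
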